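-- pv_equiv track=rewrite | github.com/pypi-data/pypi-mirror-198 | packages/bottlenest/bottlenest-0.0.19-py3-none-any.whl/bottlenest/transports/http/decorators/NestRoute.py | _nestjsToFlaskPath
-- ===== SOURCE A (Python) =====
-- def _nestjsToFlaskPath(path: str) -> str:
--     result = ''
--     parts = path.split('/')
--     for part in parts:
--         if part.startswith(':'):
--             result += '/<' + part[1:] + '>'
--         else:
--             result += '/' + part
--     return result[1:]
-- ===== SOURCE B (Python) =====
-- def _nestjsToFlaskPath(path: str) -> str:
--     # single left-to-right scan; no tokenize/rebuild pass
--     out = []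
--     i, n = 0, len(path)
--     at_start = True
--     while i < n:
--         c = path[i]
--         if at_start and c == ':':
--             j = i + 1
--             while j < n and path[j] != '/':
--                 j += 1
--             out.append('<' + path[i + 1:j] + '>')
--             i = j
--             at_start = False
--         else:
--             out.append(c)
--             at_start = c == '/'
--             i += 1
--     return ''.join(out)
-- ===== Notes on version B (the rewrite author's own statement) =====
-- stated objective: alternative
-- what changed: Replaces split-by-slash plus rebuild-and-strip-leading-separator with a single left-to-right character scan that tracks segment starts and rewrites colon-prefixed segments in place.
import Mathlib
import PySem

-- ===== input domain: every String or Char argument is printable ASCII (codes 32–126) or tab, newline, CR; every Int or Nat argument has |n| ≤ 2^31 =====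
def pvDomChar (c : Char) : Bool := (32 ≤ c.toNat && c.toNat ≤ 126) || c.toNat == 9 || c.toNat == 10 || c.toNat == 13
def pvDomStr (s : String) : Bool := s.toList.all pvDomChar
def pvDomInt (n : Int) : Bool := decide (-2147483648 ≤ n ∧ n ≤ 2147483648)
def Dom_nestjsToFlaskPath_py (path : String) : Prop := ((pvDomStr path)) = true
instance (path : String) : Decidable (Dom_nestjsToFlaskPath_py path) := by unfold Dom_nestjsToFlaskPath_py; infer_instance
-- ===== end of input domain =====

-- B replaces A's tokenize-by-separator + rebuild-and-strip with a single character scan tracking segment starts (alternative decomposition, same cost).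


-- ===== PORT A =====
-- literal transliteration of A on the code-point list: split on the separator, fold
-- rebuilding each piece into result, then result[1:]
def nestjsToFlaskPath_py (path : String) : String :=
  let parts := PySem.Chars.splitOn path.toList ['/']
  let result := parts.foldl (fun acc part =>
    if PySem.Chars.startswith part [':'] then
      acc ++ ['/', '<'] ++ PySem.Chars.slice part (some 1) none ++ ['>']
    else
      acc ++ ['/'] ++ part) []
  String.ofList (PySem.Chars.slice result (some 1) none)

-- ===== PORT B =====
-- inner while loop of Source B: chars of the parameter up to the next separator, and the rest
def pvTakeParam : List Char → List Char × List Char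
  | [] => ([], [])
  | c :: rest =>
    if c = '/' then ([], c :: rest)
    else
      let (p, r) := pvTakeParam rest
      (c :: p, r)

theorem pvTakeParam_snd_length : ∀ (l : List Char), (pvTakeParam l).2.length ≤ l.length := by
  intro l
  induction l with
  | nil => simp [pvTakeParam]
  | cons c rest ih =>
    simp only [pvTakeParam]
    split
    · simp
    · simpa using Nat.le_succ_of_le ih

-- outer while loop of Source B: the Bool is at_start
def pvScan : Bool → List Char → List Char
  | _, [] => []
  | atStart, c :: rest =>
    if atStart && (c == ':') then
      let pr := pvTakeParam rest
      '<' :: pr.1 ++ '>' :: pvScan false pr.2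
    else
      c :: pvScan (c == '/') rest
termination_by _ l => l.length
decreasing_by
  · exact Nat.lt_succ_of_le (pvTakeParam_snd_length rest)
  · simp

def nestjsToFlaskPath_py_alt (path : String) : String :=
  String.ofList (pvScan true path.toList)

-- ===== PRECONDITION & SPEC =====
def Spec_nestjsToFlaskPath_py (path : String) (out : String) : Prop := out = nestjsToFlaskPath_py_alt path
instance (path : String) (out : String) : Decidable (Spec_nestjsToFlaskPath_py path out) := by unfold Spec_nestjsToFlaskPath_py; infer_instance

-- ===== CLAIM (what is proved, stated in full; the proofs are below) =====
def Claim_equal_nestjsToFlaskPath_py : Prop := ∀ (path : String), Dom_nestjsToFlaskPath_py path → Spec_nestjsToFlaskPath_py path (nestjsToFlaskPath_py path)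

-- ===== LEMMAS AND PROOFS =====

def pvSos : List Char → List Char → List (List Char)
  | pre, [] => [pre]
  | pre, c :: r => if c = '/' then pre :: pvSos [] r else pvSos (pre ++ [c]) r
def pvF (part : List Char) : List Char :=
  if PySem.Chars.startswith part [':'] then '<' :: part.drop 1 ++ ['>'] else part
def pvG (part : List Char) : List Char := '/' :: pvF part
def pvFlat1 : List (List Char) → List Char
  | [] => []
  | p :: rest => pvF p ++ rest.flatMap pvG
def pvContAfter (cs : List Char) : List Char :=
  match (pvTakeParam cs).2 with
  | [] => []
  | _ :: r2 => '/' :: pvScan true r2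
theorem pvSos_pre : ∀ (r pre : List Char),
    pvSos pre r = (pre ++ (pvTakeParam r).1) ::
      (match (pvTakeParam r).2 with
       | [] => ([] : List (List Char))
       | _ :: r2 => pvSos [] r2) := by
  intro r
  induction r with
  | nil => intro pre; simp [pvSos, pvTakeParam]
  | cons c r3 ih =>
    intro pre
    by_cases hc : c = '/'
    · subst hc; simp [pvSos, pvTakeParam]
    · simp only [pvSos, pvTakeParam, if_neg hc]
      rw [ih]
      simp
theorem pvTakeParam_snd_shape : ∀ (l : List Char),
    (pvTakeParam l).2 = [] ∨ ∃ r2, (pvTakeParam l).2 = '/' :: r2 := by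
  intro l
  induction l with
  | nil => left; simp [pvTakeParam]
  | cons c rest ih =>
    by_cases hc : c = '/'
    · subst hc; right; exact ⟨rest, by simp [pvTakeParam]⟩
    · simpa [pvTakeParam, hc] using ih
theorem pvFlatMap_cons (p : List Char) (rest : List (List Char)) :
    (p :: rest).flatMap pvG = '/' :: pvFlat1 (p :: rest) := by
  simp [pvFlat1, pvG]
theorem pvKey : ∀ (n : Nat) (cs : List Char), cs.length ≤ n →
    (pvScan true cs = pvFlat1 (pvSos [] cs)) ∧
    (pvScan false cs = (pvTakeParam cs).1 ++ pvContAfter cs) := by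
  intro n
  induction n with
  | zero =>
    intro cs h
    have : cs = [] := List.length_eq_zero_iff.mp (Nat.le_zero.mp h)
    subst this
    refine ⟨by simp [pvScan, pvSos, pvFlat1, pvF, PySem.Chars.startswith, List.isPrefixOf], ?_⟩
    simp [pvScan, pvTakeParam, pvContAfter]
  | succ n ih =>
    intro cs h
    cases cs with
    | nil =>
      refine ⟨by simp [pvScan, pvSos, pvFlat1, pvF, PySem.Chars.startswith, List.isPrefixOf], ?_⟩
      simp [pvScan, pvTakeParam, pvContAfter]
    | cons c r =>
      have hr : r.length ≤ n := by simp at h; omega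
      constructor
      · -- pvScan true (c :: r)
        by_cases hc : c = ':'
        · subst hc
          rw [pvScan]
          simp only [Bool.true_and, beq_self_eq_true, if_pos]
          have hsos : pvSos [] (':' :: r) = pvSos [':'] r := by
            simp [pvSos]
          rw [hsos, pvSos_pre r [':']]
          rcases pvTakeParam_snd_shape r with h2 | ⟨r2, h2⟩
          · simp [h2, pvFlat1, pvF, PySem.Chars.startswith, List.isPrefixOf, pvScan]
          · have hr2 : r2.length ≤ n := by
              have := pvTakeParam_snd_length r
              rw [h2] at this
              simp at this; omega
            rw [h2]
            have hscan : pvScan false ('/' :: r2) = '/' :: pvScan true r2 := by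
              rw [pvScan]; simp
            simp only [hscan]
            rw [(ih r2 hr2).1]
            rw [pvSos_pre r2 []]
            simp [pvFlat1, pvG, pvF, PySem.Chars.startswith, List.isPrefixOf]
        · by_cases hsl : c = '/'
          · subst hsl
            have hscan : pvScan true ('/' :: r) = '/' :: pvScan true r := by
              rw [pvScan]; simp
            rw [hscan]
            have hsos : pvSos [] ('/' :: r) = [] :: pvSos [] r := by simp [pvSos]
            rw [hsos]
            have : pvFlat1 ([] :: pvSos [] r) = pvF [] ++ (pvSos [] r).flatMap pvG := rfl
            rw [this]
            rw [pvSos_pre r [], pvFlatMap_cons, ← pvSos_pre r []]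
            rw [← (ih r hr).1]
            simp [pvF, PySem.Chars.startswith, List.isPrefixOf]
          · have hflag : (c == '/') = false := by simp [hsl]
            have hscan : pvScan true (c :: r) = c :: pvScan false r := by
              rw [pvScan]; simp [hc, hflag]
            rw [hscan]
            have hsos : pvSos [] (c :: r) = pvSos [c] r := by simp [pvSos, hsl]
            rw [hsos, pvSos_pre r [c]]
            have hstart : PySem.Chars.startswith (c :: (pvTakeParam r).1) [':'] = false := by
              simp [PySem.Chars.startswith, List.isPrefixOf]
              exact fun he => hc he.symm
            rw [(ih r hr).2]
            rcases pvTakeParam_snd_shape r with h2 | ⟨r2, h2⟩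
            · simp [h2, pvFlat1, pvF, hstart, pvContAfter]
            · have hr2 : r2.length ≤ n := by
                have := pvTakeParam_snd_length r
                rw [h2] at this
                simp at this; omega
              simp only [h2, pvFlat1, pvContAfter]
              rw [(ih r2 hr2).1, pvSos_pre r2 []]
              simp [pvFlat1, pvG, pvF, hstart]
      · -- pvScan false (c :: r)
        by_cases hsl : c = '/'
        · subst hsl
          have hscan : pvScan false ('/' :: r) = '/' :: pvScan true r := by
            rw [pvScan]; simp
          rw [hscan]
          simp [pvTakeParam, pvContAfter]
        · have hflag : (c == '/') = false := by simp [hsl]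
          have hscan : pvScan false (c :: r) = c :: pvScan false r := by
            rw [pvScan]; simp [hflag]
          rw [hscan, (ih r hr).2]
          have htp : pvTakeParam (c :: r) = (c :: (pvTakeParam r).1, (pvTakeParam r).2) := by
            simp [pvTakeParam, hsl]
          have hca : pvContAfter (c :: r) = pvContAfter r := by
            simp [pvContAfter, htp]
          rw [hca, htp]
          simp

theorem pvGo_spec : ∀ (fuel : Nat) (l cur : List Char) (acc : List (List Char)), l.length < fuel →
    PySem.Chars.splitOn.go ['/'] fuel l cur acc = acc.reverse ++ pvSos cur.reverse l := by
  intro fuel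
  induction fuel with
  | zero => intro l cur acc h; omega
  | succ f ih =>
    intro l cur acc h
    cases l with
    | nil => simp [PySem.Chars.splitOn.go, pvSos]
    | cons c rest =>
      by_cases hc : c = '/'
      · subst hc
        rw [PySem.Chars.splitOn.go]
        have hp : List.isPrefixOf ['/'] ('/' :: rest) = true := by simp [List.isPrefixOf]
        rw [if_pos hp]
        rw [ih _ _ _ (by simp at h ⊢; omega)]
        simp [pvSos]
      · rw [PySem.Chars.splitOn.go]
        have hp : List.isPrefixOf ['/'] (c :: rest) = false := by
          simp [List.isPrefixOf]
          exact fun he => hc he.symm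
        rw [if_neg (by simp [hp])]
        rw [ih _ _ _ (by simp at h ⊢; omega)]
        simp [pvSos, hc]

theorem pvSplitOn_eq (cs : List Char) : PySem.Chars.splitOn cs ['/'] = pvSos [] cs := by
  rw [PySem.Chars.splitOn, pvGo_spec _ _ _ _ (by omega)]
  simp

-- ===== VERDICT (by name: the statement is the Claim_ definition above) =====
theorem nestjsToFlaskPath_py_spec : Claim_equal_nestjsToFlaskPath_py := by
  intro path _
  unfold Spec_nestjsToFlaskPath_py nestjsToFlaskPath_py nestjsToFlaskPath_py_alt
  have hstep : (fun (acc part : List Char) =>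
      if PySem.Chars.startswith part [':'] then
        acc ++ ['/', '<'] ++ PySem.Chars.slice part (some 1) none ++ ['>']
      else acc ++ ['/'] ++ part) = fun acc part => acc ++ pvG part := by
    funext acc part
    by_cases h : PySem.Chars.startswith part [':'] = true
    · simp [h, pvG, pvF, PySem.Chars.slice_eq_listSlice, PySem.List.slice_from_one,
        List.drop_one]
    · simp [h, pvG, pvF]
  simp only [hstep, PySem.List.foldl_append_eq_flatMap, List.nil_append]
  rw [pvSplitOn_eq, pvSos_pre path.toList [], pvFlatMap_cons, ← pvSos_pre path.toList []]
  rw [PySem.Chars.slice_eq_listSlice, PySem.List.slice_from_one]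
  simp only [List.tail_cons]
  rw [(pvKey path.toList.length path.toList le_rfl).1]
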